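-- pv_equiv track=rewrite | github.com/Jamin252/Year3Proj | Code/mrs_beam_wer.py | _bow_window_lb
-- ===== SOURCE A (Python) =====
-- from typing import Dict, List, Tuple, Optional
--
-- def _bow_window_lb(
--     rem_a: List[str],
--     rem_b: List[str],
--     rem_h: List[str],
--     window: int,
-- ) -> int:
--     """
--     Lower bound on edit distance based on bag-of-words mismatch in the next window of words.
--     """
--
--     if window <= 0:
--         return 0
--
--     ref_window = rem_a[:window] + rem_b[:window]
--     hyp_window = rem_h[:window]
--
--     counts: Dict[str, int] = {}
--     for w in ref_window:
--         counts[w] = counts.get(w, 0) + 1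
--     for w in hyp_window:
--         counts[w] = counts.get(w, 0) - 1
--
--     l1 = sum(abs(v) for v in counts.values())
--     return (l1 + 1) // 2
-- ===== SOURCE B (Python) =====
-- def _bow_window_lb(rem_a, rem_b, rem_h, window):
--     if window <= 0:
--         return 0
--     pool = rem_a[:window] + rem_b[:window]
--     unmatched = 0
--     for w in rem_h[:window]:
--         try:
--             pool.remove(w)
--         except ValueError:
--             unmatched += 1
--     l1 = len(pool) + unmatched
--     return (l1 + 1) // 2
-- ===== Notes on version B (the rewrite author's own statement) =====
-- stated objective: alternative
-- what changed: Replaces the signed-count dictionary and abs-sum with a greedy matching loop: each hypothesis word removes one occurrence from the reference pool, and l1 is the leftover pool plus the unmatched hypothesis words.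
import Mathlib
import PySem

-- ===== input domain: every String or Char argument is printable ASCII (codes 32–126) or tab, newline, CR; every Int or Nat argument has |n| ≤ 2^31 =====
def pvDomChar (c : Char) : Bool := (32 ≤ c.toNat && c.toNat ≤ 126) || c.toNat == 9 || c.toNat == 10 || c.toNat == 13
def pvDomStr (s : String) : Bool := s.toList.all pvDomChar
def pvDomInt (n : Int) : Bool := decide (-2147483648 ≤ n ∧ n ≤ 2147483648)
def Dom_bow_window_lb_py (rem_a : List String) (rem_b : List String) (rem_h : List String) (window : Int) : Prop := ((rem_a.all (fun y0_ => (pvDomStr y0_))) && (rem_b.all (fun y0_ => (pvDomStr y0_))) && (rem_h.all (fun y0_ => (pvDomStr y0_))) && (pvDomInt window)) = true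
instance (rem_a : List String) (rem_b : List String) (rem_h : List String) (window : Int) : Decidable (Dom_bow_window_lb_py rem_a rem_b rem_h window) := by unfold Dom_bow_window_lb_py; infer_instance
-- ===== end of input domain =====

-- B replaces A's signed-count dict + abs-sum with a greedy matching loop: each hypothesis
-- word removes one occurrence from the reference pool; l1 = leftover pool + unmatched words.

-- ===== PORT A =====
def bow_window_lb_py (rem_a : List String) (rem_b : List String) (rem_h : List String) (window : Int) : Int :=
  if window ≤ 0 then 0
  else
    let ref_window := PySem.List.slice rem_a none (some window) ++ PySem.List.slice rem_b none (some window)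
    let hyp_window := PySem.List.slice rem_h none (some window)
    let counts : PySem.Dict String Int :=
      ref_window.foldl (fun d w => d.insert w (d.getD w 0 + 1)) PySem.Dict.empty
    let counts2 := hyp_window.foldl (fun d w => d.insert w (d.getD w 0 - 1)) counts
    let l1 := (counts2.values.map (fun v => |v|)).sum
    PySem.Int.floordiv (l1 + 1) 2

-- ===== PORT B =====
-- the try: pool.remove(w) / except ValueError: unmatched += 1 body of B's loop
def bowStepB (st : List String × Int) (w : String) : List String × Int :=
  match PySem.List.remove? st.1 w with
  | some p => (p, st.2)
  | none => (st.1, st.2 + 1)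

def bow_window_lb_py_alt (rem_a : List String) (rem_b : List String) (rem_h : List String) (window : Int) : Int :=
  if window ≤ 0 then 0
  else
    let pool0 := PySem.List.slice rem_a none (some window) ++ PySem.List.slice rem_b none (some window)
    let st := (PySem.List.slice rem_h none (some window)).foldl bowStepB (pool0, 0)
    let l1 := (st.1.length : Int) + st.2
    PySem.Int.floordiv (l1 + 1) 2

-- ===== PRECONDITION & SPEC =====
def Spec_bow_window_lb_py (rem_a : List String) (rem_b : List String) (rem_h : List String) (window : Int) (out : Int) : Prop := out = bow_window_lb_py_alt rem_a rem_b rem_h window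
instance (rem_a : List String) (rem_b : List String) (rem_h : List String) (window : Int) (out : Int) : Decidable (Spec_bow_window_lb_py rem_a rem_b rem_h window out) := by unfold Spec_bow_window_lb_py; infer_instance

-- ===== CLAIM (what is proved, stated in full; the proofs are below) =====
def Claim_equal_bow_window_lb_py : Prop := ∀ (rem_a : List String) (rem_b : List String) (rem_h : List String) (window : Int), Dom_bow_window_lb_py rem_a rem_b rem_h window → Spec_bow_window_lb_py rem_a rem_b rem_h window (bow_window_lb_py rem_a rem_b rem_h window)

-- ===== LEMMAS AND PROOFS =====

-- the hyp loop of A: inserting with getD−1 subtracts the count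
lemma getD_foldl_insert_sub_one (l : List String) (d : PySem.Dict String Int) (v : String) :
    (l.foldl (fun d x => d.insert x (d.getD x 0 - 1)) d).getD v 0 = d.getD v 0 - l.count v := by
  induction l generalizing d with
  | nil => simp
  | cons x l ih =>
    simp only [List.foldl_cons, ih, PySem.Dict.getD_insert, List.count_cons]
    by_cases h : v = x
    · subst h; simp; ring
    · simp [h]
      exact fun e => h e.symm

-- sum of counts of L over a nodup list containing all of L is L.length
lemma sum_count_over (K L : List String) (hK : K.Nodup) (hsub : ∀ x ∈ L, x ∈ K) :
    (K.map (fun k => (L.count k : Int))).sum = L.length := by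
  induction L with
  | nil => simp
  | cons x L ih =>
    have hx : x ∈ K := hsub x (by simp)
    have hL : ∀ y ∈ L, y ∈ K := fun y hy => hsub y (by simp [hy])
    have hsplit : (K.map (fun k => ((x :: L).count k : Int))).sum
        = (K.map (fun k => (L.count k : Int))).sum
          + (K.map (fun k => if (k == x) then (1:Int) else 0)).sum := by
      rw [← PySem.List.sum_map_add_int]
      apply congrArg
      apply List.map_congr_left
      intro k _
      rw [List.count_cons]
      by_cases h : k = x
      · simp [h]
      · have hb : (k == x) = false := beq_false_of_ne h
        simp [hb]
        exact fun e => h e.symm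
    have hone : (K.map (fun k => if (k == x) then (1:Int) else 0)).sum = 1 := by
      rw [PySem.List.sum_map_ite_one_zero]
      have hc : K.countP (fun k => k == x) = K.count x := by
        simp [List.count]
      rw [hc, List.count_eq_one_of_mem hK hx]
      simp
    rw [hsplit, ih hL, hone]
    simp only [List.length_cons]
    push_cast; ring

-- A's abs-sum over the signed counts, in terms of the min-overlap over the same key list
lemma key_identity (R H K : List String) (hKnd : K.Nodup) (hmemK : ∀ x, x ∈ R ++ H → x ∈ K) :
    (K.map (fun k => |(R.count k : Int) - (H.count k : Int)|)).sum
    = (R.length : Int) + (H.length : Int)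
      - 2 * (K.map (fun k => min ((R.count k : Int)) ((H.count k : Int)))).sum := by
  have hpt : ∀ k, |(R.count k : Int) - (H.count k : Int)|
      = (R.count k : Int) + (H.count k : Int)
        - 2 * min ((R.count k : Int)) ((H.count k : Int)) := by
    intro k
    rcases le_total ((R.count k : Int)) ((H.count k : Int)) with h | h
    · rw [min_eq_left h, abs_of_nonpos (by omega)]; ring
    · rw [min_eq_right h, abs_of_nonneg (by omega)]; ring
  have hsplit : (K.map (fun k => |(R.count k : Int) - (H.count k : Int)|)).sum
      = (K.map (fun k => (R.count k : Int))).sum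
        + (K.map (fun k => (H.count k : Int))).sum
        - 2 * (K.map (fun k => min ((R.count k : Int)) ((H.count k : Int)))).sum := by
    clear hmemK hKnd
    induction K with
    | nil => simp
    | cons k K ih => simp only [List.map_cons, List.sum_cons, ih, hpt k]; ring
  have hR : (K.map (fun k => (R.count k : Int))).sum = R.length :=
    sum_count_over K R hKnd (fun x hx => hmemK x (by simp [hx]))
  have hH : (K.map (fun k => (H.count k : Int))).sum = H.length :=
    sum_count_over K H hKnd (fun x hx => hmemK x (by simp [hx]))
  rw [hsplit, hR, hH]

-- A's dict after both loops: keys = set(R++H) (nodup), value at k = R.count k − H.count k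
lemma dict_keys_eq (R H : List String) :
    (H.foldl (fun (d : PySem.Dict String Int) w => d.insert w (d.getD w 0 - 1))
      (R.foldl (fun (d : PySem.Dict String Int) w => d.insert w (d.getD w 0 + 1)) PySem.Dict.empty)).keys
    = PySem.Set.ofList (R ++ H) := by
  rw [PySem.Dict.foldl_insert_getD_add_one_eq_counter, PySem.Dict.keys_foldl_insert,
      PySem.Dict.keys_counter]
  show PySem.Set.update (PySem.Set.ofList R) H = _
  rw [PySem.Set.ofList_eq_foldl, PySem.Set.ofList_eq_foldl, List.foldl_append]
  rfl

lemma dict_keys_nodup (R H : List String) :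
    (H.foldl (fun (d : PySem.Dict String Int) w => d.insert w (d.getD w 0 - 1))
      (R.foldl (fun (d : PySem.Dict String Int) w => d.insert w (d.getD w 0 + 1)) PySem.Dict.empty)).keys.Nodup := by
  rw [PySem.Dict.foldl_insert_getD_add_one_eq_counter]
  exact PySem.Dict.nodup_keys_foldl_insert _ _ _ (PySem.Dict.nodup_keys_counter R)

lemma dict_getD_eq (R H : List String) (v : String) :
    (H.foldl (fun (d : PySem.Dict String Int) w => d.insert w (d.getD w 0 - 1))
      (R.foldl (fun (d : PySem.Dict String Int) w => d.insert w (d.getD w 0 + 1)) PySem.Dict.empty)).getD v 0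
    = (R.count v : Int) - (H.count v : Int) := by
  rw [PySem.Dict.foldl_insert_getD_add_one_eq_counter, getD_foldl_insert_sub_one,
      PySem.Dict.getD_counter]

-- B's greedy-removal loop: leftover pool + unmatched = |P| + u + |H| − 2·overlap(P,H),
-- the overlap being the min-count sum over any finset S covering H
lemma loopB_len (S : Finset String) :
    ∀ (H P : List String) (u : Int), (∀ x ∈ H, x ∈ S) →
    ((H.foldl bowStepB (P, u)).1.length : Int) + (H.foldl bowStepB (P, u)).2
      = (P.length : Int) + u + H.length
        - 2 * ∑ x ∈ S, min ((P.count x : Int)) ((H.count x : Int)) := by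
  intro H
  induction H with
  | nil => intro P u _; simp
  | cons w H ih =>
    intro P u hS
    have hwS : w ∈ S := hS w (by simp)
    have hS' : ∀ x ∈ H, x ∈ S := fun x hx => hS x (by simp [hx])
    by_cases hw : w ∈ P
    · have hstep : bowStepB (P, u) w = (P.erase w, u) := by
        simp [bowStepB, PySem.List.remove?_eq_some_erase P w hw]
      have hcnt : 1 ≤ P.count w := List.one_le_count_iff.mpr hw
      have hsum : ∑ x ∈ S, min ((P.count x : Int)) (((w :: H).count x : Int))
          = (∑ x ∈ S, min (((P.erase w).count x : Int)) ((H.count x : Int))) + 1 := by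
        have hpt : ∀ x ∈ S, min ((P.count x : Int)) (((w :: H).count x : Int))
            = min (((P.erase w).count x : Int)) ((H.count x : Int))
              + (if x = w then (1:Int) else 0) := by
          intro x _
          by_cases hx : x = w
          · subst hx
            have hHc : (x :: H).count x = H.count x + 1 := by simp
            have hPc : (P.erase x).count x = P.count x - 1 := List.count_erase_self ..
            rw [hHc, hPc, if_pos rfl]
            have h1 : ((P.count x - 1 : Nat) : Int) = (P.count x : Int) - 1 := by omega
            rw [h1]
            push_cast
            omega
          · have hHc : (w :: H).count x = H.count x := by
              simp only [List.count_cons]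
              simp
              exact fun e => hx e.symm
            have hPc : (P.erase w).count x = P.count x := List.count_erase_of_ne hx ..
            rw [hHc, hPc, if_neg hx]
            simp
        rw [Finset.sum_congr rfl hpt, Finset.sum_add_distrib,
            Finset.sum_ite_eq' S w (fun _ => (1:Int)), if_pos hwS]
      have hlen : ((P.erase w).length : Int) = (P.length : Int) - 1 := by
        rw [List.length_erase_of_mem hw]
        have : 1 ≤ P.length := List.length_pos_of_mem hw
        omega
      simp only [List.foldl_cons, hstep]
      rw [ih (P.erase w) u hS', hsum, hlen]
      simp only [List.length_cons]
      push_cast; ring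
    · have hstep : bowStepB (P, u) w = (P, u + 1) := by
        have h0 : PySem.List.remove? P w = none := (PySem.List.remove?_eq_none_iff P w).mpr hw
        simp [bowStepB, h0]
      have hsum : ∑ x ∈ S, min ((P.count x : Int)) (((w :: H).count x : Int))
          = ∑ x ∈ S, min ((P.count x : Int)) ((H.count x : Int)) := by
        apply Finset.sum_congr rfl
        intro x _
        by_cases hx : x = w
        · subst hx
          have h0 : P.count x = 0 := List.count_eq_zero.mpr hw
          have hHc : (x :: H).count x = H.count x + 1 := by simp
          rw [h0, hHc]
          push_cast
          omega
        · have hHc : (w :: H).count x = H.count x := by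
            simp only [List.count_cons]
            simp
            exact fun e => hx e.symm
          rw [hHc]
      simp only [List.foldl_cons, hstep]
      rw [ih P (u + 1) hS', hsum]
      simp only [List.length_cons]
      push_cast; ring

-- a nodup list's map-sum is the finset sum over its elements
lemma list_sum_eq_finset_sum (K : List String) (hK : K.Nodup) (f : String → Int) :
    (K.map f).sum = ∑ x ∈ K.toFinset, f x := by
  rw [List.sum_toFinset _ hK]

-- ===== VERDICT (by name: the statement is the Claim_ definition above) =====
theorem bow_window_lb_py_spec : Claim_equal_bow_window_lb_py := by
  intro rem_a rem_b rem_h window _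
  unfold Spec_bow_window_lb_py
  by_cases hw : window ≤ 0
  · simp [bow_window_lb_py, bow_window_lb_py_alt, hw]
  · simp only [bow_window_lb_py, bow_window_lb_py_alt, hw, if_false]
    set R := PySem.List.slice rem_a none (some window) ++ PySem.List.slice rem_b none (some window) with hR
    set H := PySem.List.slice rem_h none (some window) with hH
    congr 1
    set K : List String := PySem.Set.ofList (R ++ H) with hK
    have hKnd : K.Nodup := PySem.Set.nodup_ofList _
    have hmemK : ∀ x, x ∈ R ++ H → x ∈ K := fun x hx => (PySem.Set.mem_ofList _ _).mpr hx
    -- A's side: the values of the dict, summed in absolute value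
    have hvals : (H.foldl (fun (d : PySem.Dict String Int) w => d.insert w (d.getD w 0 - 1))
        (R.foldl (fun (d : PySem.Dict String Int) w => d.insert w (d.getD w 0 + 1)) PySem.Dict.empty)).values
        = K.map (fun k => (R.count k : Int) - (H.count k : Int)) := by
      rw [PySem.Dict.values_eq_map_keys _ (dict_keys_nodup R H) 0, dict_keys_eq]
      apply List.map_congr_left
      intro k _
      exact dict_getD_eq R H k
    have hA : ((H.foldl (fun (d : PySem.Dict String Int) w => d.insert w (d.getD w 0 - 1))
        (R.foldl (fun (d : PySem.Dict String Int) w => d.insert w (d.getD w 0 + 1)) PySem.Dict.empty)).values.map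
          (fun v => |v|)).sum
        = (R.length : Int) + (H.length : Int)
          - 2 * (K.map (fun k => min ((R.count k : Int)) ((H.count k : Int)))).sum := by
      rw [hvals, List.map_map]
      exact key_identity R H K hKnd hmemK
    -- B's side: the greedy loop
    have hB : ((H.foldl bowStepB (R, 0)).1.length : Int) + (H.foldl bowStepB (R, 0)).2
        = (R.length : Int) + 0 + (H.length : Int)
          - 2 * ∑ x ∈ K.toFinset, min ((R.count x : Int)) ((H.count x : Int)) :=
      loopB_len K.toFinset H R 0
        (fun x hx => List.mem_toFinset.mpr (hmemK x (by simp [hx])))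
    have hmin : (K.map (fun k => min ((R.count k : Int)) ((H.count k : Int)))).sum
        = ∑ x ∈ K.toFinset, min ((R.count x : Int)) ((H.count x : Int)) :=
      list_sum_eq_finset_sum K hKnd _
    rw [hA, hmin]
    rw [hB]
    ring
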